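-- pv_equiv track=rewrite | github.com/jlchafardet/passphrase-generator-python | passphrase-generator.py | assess_strength
-- ===== SOURCE A (Python) =====
-- def assess_strength(passphrase, language='en'):
--     length_score = len(passphrase) >= 12  # Length should be at least 12 characters
--     upper_case = any(c.isupper() for c in passphrase)
--     lower_case = any(c.islower() for c in passphrase)
--     digits = any(c.isdigit() for c in passphrase)
--     special_chars = any(c in '@#$%^&*()_+!~`' for c in passphrase)  # Define special characters
--
--     # Count the number of character types present
--     character_types = sum([length_score, upper_case, lower_case, digits, special_chars])
--
--     # Determine strength based on character types
--     if character_types == 0: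
--         return "Muy Débil" if language == 'es' else "Very Weak"
--     elif character_types == 1:
--         return "Débil" if language == 'es' else "Weak"
--     elif character_types == 2:
--         return "Normal"  # No translation needed
--     elif character_types == 3:
--         return "Fuerte" if language == 'es' else "Strong"
--     else:
--         return "Muy Fuerte" if language == 'es' else "Very Strong"
-- ===== SOURCE B (Python) =====
-- LABELS = {
--     'es': ["Muy Débil", "Débil", "Normal", "Fuerte", "Muy Fuerte"],
--     'en': ["Very Weak", "Weak", "Normal", "Strong", "Very Strong"],
-- }
--
-- SPECIALS = '@#$%^&*()_+!~`'
--
--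
-- def assess_strength(passphrase, language='en'):
--     upper = lower = digit = special = False
--     for c in passphrase:
--         if c.isupper():
--             upper = True
--         elif c.islower():
--             lower = True
--         elif c.isdigit():
--             digit = True
--         elif c in SPECIALS:
--             special = True
--         if upper and lower and digit and special:
--             break
--     count = (len(passphrase) >= 12) + upper + lower + digit + special
--     labels = LABELS['es'] if language == 'es' else LABELS['en']
--     return labels[min(count, 4)]
-- ===== Notes on version B (the rewrite author's own statement) =====
-- stated objective: simpler
-- what changed: Replaces A's four separate any()-scans and if/elif label chain with a single early-exiting loop computing all four character-type flags and a per-language label table indexed by the count.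
import Mathlib
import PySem

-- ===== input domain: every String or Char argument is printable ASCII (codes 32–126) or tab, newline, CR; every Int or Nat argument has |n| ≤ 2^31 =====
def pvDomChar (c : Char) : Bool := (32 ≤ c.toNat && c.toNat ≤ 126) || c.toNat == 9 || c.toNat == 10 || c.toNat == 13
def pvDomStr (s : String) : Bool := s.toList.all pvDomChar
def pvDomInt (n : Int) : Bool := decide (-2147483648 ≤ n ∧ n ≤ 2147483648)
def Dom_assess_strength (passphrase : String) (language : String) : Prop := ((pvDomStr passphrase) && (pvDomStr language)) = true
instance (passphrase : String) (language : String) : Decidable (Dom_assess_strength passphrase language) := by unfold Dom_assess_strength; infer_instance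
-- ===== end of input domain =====

-- B: one single scan computing all four character-type flags (with early break),
-- then the label is picked from a per-language table indexed by the count (objective: simpler).

-- ===== PORT A =====
def pvSpecials : List Char := ['@','#','$','%','^','&','*','(',')','_','+','!','~','`']

def assess_strength (passphrase : String) (language : String) : String :=
  let length_score : Bool := decide (PySem.Str.len passphrase ≥ 12)
  let upper_case : Bool := passphrase.toList.any PySem.Chars.isupper
  let lower_case : Bool := passphrase.toList.any PySem.Chars.islower
  let digits : Bool := passphrase.toList.any PySem.Chars.isdigit
  let special_chars : Bool := passphrase.toList.any (fun c => pvSpecials.contains c)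
  let character_types : Int :=
    [length_score, upper_case, lower_case, digits, special_chars].foldl
      (fun a b => a + (if b then 1 else 0)) 0
  if character_types == 0 then (if language == "es" then "Muy Débil" else "Very Weak")
  else if character_types == 1 then (if language == "es" then "Débil" else "Weak")
  else if character_types == 2 then "Normal"
  else if character_types == 3 then (if language == "es" then "Fuerte" else "Strong")
  else (if language == "es" then "Muy Fuerte" else "Very Strong")

-- ===== PORT B =====
def pvLabelsEs : List String := ["Muy Débil", "Débil", "Normal", "Fuerte", "Muy Fuerte"]
def pvLabelsEn : List String := ["Very Weak", "Weak", "Normal", "Strong", "Very Strong"]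

def pvScanFlags : List Char → Bool → Bool → Bool → Bool → Bool × Bool × Bool × Bool
  | [], u, l, d, s => (u, l, d, s)
  | c :: cs, u, l, d, s =>
    let st :=
      if PySem.Chars.isupper c then (true, l, d, s)
      else if PySem.Chars.islower c then (u, true, d, s)
      else if PySem.Chars.isdigit c then (u, l, true, s)
      else if pvSpecials.contains c then (u, l, d, true)
      else (u, l, d, s)
    if st.1 && st.2.1 && st.2.2.1 && st.2.2.2 then st
    else pvScanFlags cs st.1 st.2.1 st.2.2.1 st.2.2.2

def assess_strength_alt (passphrase : String) (language : String) : String :=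
  match pvScanFlags passphrase.toList false false false false with
  | (u, l, d, s) =>
    let count : Int :=
      (if decide (PySem.Str.len passphrase ≥ 12) then 1 else 0) +
      (if u then 1 else 0) + (if l then 1 else 0) +
      (if d then 1 else 0) + (if s then 1 else 0)
    let labels := if language == "es" then pvLabelsEs else pvLabelsEn
    -- labels[min(count, 4)]; index is always in range, getD "" only makes the lookup total
    (labels.getD (min count 4).toNat "")

-- ===== PRECONDITION & SPEC =====
def Spec_assess_strength (passphrase : String) (language : String) (out : String) : Prop := out = assess_strength_alt passphrase language
instance (passphrase : String) (language : String) (out : String) : Decidable (Spec_assess_strength passphrase language out) := by unfold Spec_assess_strength; infer_instance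

-- ===== CLAIM (what is proved, stated in full; the proofs are below) =====
def Claim_equal_assess_strength : Prop := ∀ (passphrase : String) (language : String), Dom_assess_strength passphrase language → Spec_assess_strength passphrase language (assess_strength passphrase language)

-- ===== LEMMAS AND PROOFS =====

-- the four character classes used by the elif chain are pairwise disjoint
lemma pv_upper_not_lower {c : Char} (h : PySem.Chars.isupper c = true) :
    PySem.Chars.islower c = false := by
  simp only [PySem.Chars.isupper, PySem.Chars.islower, Bool.and_eq_true, decide_eq_true_eq,
    Char.le_def, UInt32.le_iff_toNat_le, Bool.and_eq_false_iff, decide_eq_false_iff_not,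
    show 'A'.val.toNat = 65 from rfl, show 'Z'.val.toNat = 90 from rfl,
    show 'a'.val.toNat = 97 from rfl, show 'z'.val.toNat = 122 from rfl] at *
  omega

lemma pv_letter_not_digit {c : Char}
    (h : PySem.Chars.isupper c = true ∨ PySem.Chars.islower c = true) :
    PySem.Chars.isdigit c = false := by
  simp only [PySem.Chars.isupper, PySem.Chars.islower, PySem.Chars.isdigit, Bool.and_eq_true,
    decide_eq_true_eq, Char.le_def, UInt32.le_iff_toNat_le, Bool.and_eq_false_iff,
    decide_eq_false_iff_not, show 'A'.val.toNat = 65 from rfl, show 'Z'.val.toNat = 90 from rfl,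
    show 'a'.val.toNat = 97 from rfl, show 'z'.val.toNat = 122 from rfl,
    show '0'.val.toNat = 48 from rfl, show '9'.val.toNat = 57 from rfl] at *
  omega

lemma pv_special_not_alnum {c : Char} (h : pvSpecials.contains c = true) :
    PySem.Chars.isupper c = false ∧ PySem.Chars.islower c = false ∧
    PySem.Chars.isdigit c = false := by
  simp only [pvSpecials, List.contains_eq_mem, List.mem_cons, List.not_mem_nil, or_false,
    decide_eq_true_eq] at h
  rcases h with h | h | h | h | h | h | h | h | h | h | h | h | h | h <;> subst h <;> decide

-- the scan with early break computes exactly the four `any`s of A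
lemma pvScanFlags_spec : ∀ (cs : List Char) (u l d s : Bool),
    pvScanFlags cs u l d s =
      (u || cs.any PySem.Chars.isupper, l || cs.any PySem.Chars.islower,
       d || cs.any PySem.Chars.isdigit, s || cs.any (fun c => pvSpecials.contains c)) := by
  intro cs
  induction cs with
  | nil => intro u l d s; simp [pvScanFlags]
  | cons c cs ih =>
    intro u l d s
    have hstep :
        (if PySem.Chars.isupper c then (true, l, d, s)
         else if PySem.Chars.islower c then (u, true, d, s)
         else if PySem.Chars.isdigit c then (u, l, true, s)
         else if pvSpecials.contains c then (u, l, d, true)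
         else (u, l, d, s)) =
        ((u || PySem.Chars.isupper c), (l || PySem.Chars.islower c),
         (d || PySem.Chars.isdigit c), (s || pvSpecials.contains c)) := by
      by_cases h1 : PySem.Chars.isupper c = true
      · simp [h1, pv_upper_not_lower h1, pv_letter_not_digit (Or.inl h1)]
        by_cases h4 : pvSpecials.contains c = true
        · exact absurd (pv_special_not_alnum h4).1 (by simp [h1])
        · simp_all
      · by_cases h2 : PySem.Chars.islower c = true
        · simp [h1, h2, pv_letter_not_digit (Or.inr h2)]
          by_cases h4 : pvSpecials.contains c = true
          · exact absurd (pv_special_not_alnum h4).2.1 (by simp [h2])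
          · simp_all
        · by_cases h3 : PySem.Chars.isdigit c = true
          · simp [h1, h2, h3]
            by_cases h4 : pvSpecials.contains c = true
            · exact absurd (pv_special_not_alnum h4).2.2 (by simp [h3])
            · simp_all
          · by_cases h4 : pvSpecials.contains c = true <;> simp_all
    show (if _ then _ else _) = _
    rw [hstep]
    by_cases hb : ((u || PySem.Chars.isupper c) && (l || PySem.Chars.islower c) &&
        (d || PySem.Chars.isdigit c) && (s || pvSpecials.contains c)) = true
    · rw [if_pos hb]
      simp only [Bool.and_eq_true] at hb
      obtain ⟨⟨⟨h1, h2⟩, h3⟩, h4⟩ := hb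
      have e1 : (u || (c :: cs).any PySem.Chars.isupper) = true := by
        rcases Bool.or_eq_true_iff.mp h1 with h | h <;> simp [List.any_cons, h]
      have e2 : (l || (c :: cs).any PySem.Chars.islower) = true := by
        rcases Bool.or_eq_true_iff.mp h2 with h | h <;> simp [List.any_cons, h]
      have e3 : (d || (c :: cs).any PySem.Chars.isdigit) = true := by
        rcases Bool.or_eq_true_iff.mp h3 with h | h <;> simp [List.any_cons, h]
      have e4 : (s || (c :: cs).any (fun c => pvSpecials.contains c)) = true := by
        rcases Bool.or_eq_true_iff.mp h4 with h | h <;>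
          simp only [List.any_cons, h, Bool.true_or, Bool.or_true]
      rw [h1, h2, h3, h4, e1, e2, e3, e4]
    · rw [if_neg hb]
      rw [ih]
      simp [List.any_cons, Bool.or_assoc]

-- the count-to-label table of B agrees with A's if-chain, for every flag combination
lemma pv_tail_eq (b0 u l d s : Bool) (language : String) :
    (let character_types : Int :=
        [b0, u, l, d, s].foldl (fun a b => a + (if b then 1 else 0)) 0
     if character_types == 0 then (if language == "es" then "Muy Débil" else "Very Weak")
     else if character_types == 1 then (if language == "es" then "Débil" else "Weak")
     else if character_types == 2 then "Normal"
     else if character_types == 3 then (if language == "es" then "Fuerte" else "Strong")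
     else (if language == "es" then "Muy Fuerte" else "Very Strong")) =
    ((if language == "es" then pvLabelsEs else pvLabelsEn).getD
      (min ((if b0 then (1:Int) else 0) + (if u then 1 else 0) + (if l then 1 else 0) +
            (if d then 1 else 0) + (if s then 1 else 0)) 4).toNat "") := by
  cases hl : (language == "es") <;>
    rcases b0 <;> rcases u <;> rcases l <;> rcases d <;> rcases s <;>
      simp [pvLabelsEs, pvLabelsEn, List.foldl]

-- ===== VERDICT (by name: the statement is the Claim_ definition above) =====
theorem assess_strength_spec : Claim_equal_assess_strength := by
  intro passphrase language _
  unfold Spec_assess_strength assess_strength assess_strength_alt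
  rw [pvScanFlags_spec]
  simpa using pv_tail_eq (decide (PySem.Str.len passphrase ≥ 12))
    (passphrase.toList.any PySem.Chars.isupper) (passphrase.toList.any PySem.Chars.islower)
    (passphrase.toList.any PySem.Chars.isdigit)
    (passphrase.toList.any fun c => pvSpecials.contains c) language
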